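-- pv_equiv track=rewrite | github.com/kostiantynn/OP_EXAM_PREPARATION | 8-th_labs/laba_8/logic.py | justify_sum_of_elements
-- ===== SOURCE A (Python) =====
-- def max_elem(array):
--     max = None
--     for x in array:
--         if max == None or max < x:
--             max = x
--     return max
--
-- def sum_of_elements(two_dimension_array):
--     sum = 0
--     for i in two_dimension_array:
--         for j in i:
--             sum += j
--     return sum
--
-- def cut_matrix(matrix):
--     new_matrix = matrix.copy()
--     j = len(matrix)
--     for i in range(len(matrix)):
--         new_matrix[i] = new_matrix[i][i+1:j]
--     return new_matrix
--
-- def justify_sum_of_elements(A_matrix, B_matrix, C_matrix):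
--     sum_dictionary = {}
--     matrix_array = [A_matrix, B_matrix, C_matrix]
--     for x in matrix_array:
--         sum = sum_of_elements(cut_matrix(x))
--         sum_dictionary[sum] = x
--     max_element = max_elem(sum_dictionary.keys())
--     return max_element, sum_dictionary[max_element]
-- ===== SOURCE B (Python) =====
-- def justify_sum_of_elements(A_matrix, B_matrix, C_matrix):
--     # Column-major triangular sum: walk columns j = 1..n-1 and add the entries
--     # above the diagonal (rows i < j), guarding short rows; pick the winner by a
--     # lexicographic max over (sum, position) so ties resolve to the last matrix.
--     def tri(m):
--         n = len(m)
--         s = 0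
--         for j in range(1, n):
--             for i in range(j):
--                 row = m[i]
--                 if j < len(row):
--                     s += row[j]
--         return s
--
--     mats = [A_matrix, B_matrix, C_matrix]
--     best_s, best_k = max((tri(m), k) for k, m in enumerate(mats))
--     return best_s, mats[best_k]
-- ===== Notes on version B (the rewrite author's own statement) =====
-- stated objective: alternative
-- what changed: Replaces A's row-major slicing (copy each matrix, cut each row with row[i+1:n], sum the copy, collect sums in a dict, max over keys) by a column-major walk that visits columns j=1..n-1 and adds the entries above the diagonal directly with an index guard for short rows, then selects the winner with one lexicographic max over (sum, position) pairs (ties go to the last matrix, matching the dict overwrite).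
import Mathlib
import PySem

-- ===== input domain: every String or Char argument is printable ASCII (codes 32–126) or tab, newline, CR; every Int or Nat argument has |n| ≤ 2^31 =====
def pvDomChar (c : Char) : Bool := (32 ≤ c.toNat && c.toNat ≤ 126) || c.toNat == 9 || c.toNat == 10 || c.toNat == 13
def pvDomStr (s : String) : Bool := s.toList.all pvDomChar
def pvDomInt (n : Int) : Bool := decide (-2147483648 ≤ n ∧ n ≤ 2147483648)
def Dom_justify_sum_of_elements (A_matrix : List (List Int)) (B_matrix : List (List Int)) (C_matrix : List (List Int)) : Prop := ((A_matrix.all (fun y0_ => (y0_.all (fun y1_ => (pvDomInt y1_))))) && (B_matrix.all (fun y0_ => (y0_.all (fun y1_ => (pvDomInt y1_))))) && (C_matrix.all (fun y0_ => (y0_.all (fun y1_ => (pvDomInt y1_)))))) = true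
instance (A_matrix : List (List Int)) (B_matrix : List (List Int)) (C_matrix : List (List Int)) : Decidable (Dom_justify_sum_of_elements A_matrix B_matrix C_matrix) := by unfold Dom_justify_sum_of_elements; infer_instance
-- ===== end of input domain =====

-- B replaces A's row-slice sums plus dict-of-sums by a column-major triangular walk
-- and a lexicographic max over (sum, position); objective: simpler/alternative.

-- ===== PORT A =====
def max_elem (array : List Int) : Option Int :=
  array.foldl (fun mx x =>
    match mx with
    | none => some x            -- max == None
    | some m => if m < x then some x else some m) none

def sum_of_elements (two_dimension_array : List (List Int)) : Int :=
  two_dimension_array.foldl (fun s i => i.foldl (fun s j => s + j) s) 0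

-- the index loop writes each index exactly once, from the original row at that
-- index (matrix.copy() is shallow; prior writes never touch index i), so it is a mapIdx
def cut_matrix (matrix : List (List Int)) : List (List Int) :=
  matrix.mapIdx (fun i row =>
    PySem.List.slice row (some ((i : Int) + 1)) (some (matrix.length : Int)))

def justify_sum_of_elements (A_matrix : List (List Int)) (B_matrix : List (List Int)) (C_matrix : List (List Int)) : Int × List (List Int) :=
  let d := ((PySem.Dict.empty.insert (sum_of_elements (cut_matrix A_matrix)) A_matrix).insert
              (sum_of_elements (cut_matrix B_matrix)) B_matrix).insert
              (sum_of_elements (cut_matrix C_matrix)) C_matrix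
  -- keys is nonempty, so max_elem is never none and the lookup never raises:
  -- the .getD defaults are unreachable
  let mx := (max_elem d.keys).getD 0
  (mx, d.getD mx [])

-- ===== PORT B =====
-- Source B's tri: column-major sum of the entries strictly above the diagonal,
-- guarding rows shorter than the column index
def tri (m : List (List Int)) : Int :=
  let n := (m.length : Int)
  (PySem.List.pyRange 1 n 1).foldl (fun s j =>
    (PySem.List.pyRange 0 j 1).foldl (fun s i =>
      let row := PySem.List.pyGetD m i []
      if j < (row.length : Int) then s + PySem.List.pyGetD row j 0 else s) s) 0

def justify_sum_of_elements_alt (A_matrix : List (List Int)) (B_matrix : List (List Int)) (C_matrix : List (List Int)) : Int × List (List Int) :=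
  let mats := [A_matrix, B_matrix, C_matrix]
  -- Python's max over the nonempty (tri m, k) generator: lexicographic on pairs,
  -- keeps the current pair unless the new one is strictly greater
  match ((PySem.List.enumerate mats 0).map (fun p => (tri p.2, p.1))).foldl
      (fun acc p =>
        match acc with
        | none => some p
        | some q => if q.1 < p.1 ∨ (q.1 = p.1 ∧ q.2 < p.2) then some p else some q) none with
  | some (s, k) => (s, PySem.List.pyGetD mats k [])   -- k ∈ {0,1,2}: always in range
  | none => (0, [])                                   -- unreachable: mats is nonempty

-- ===== PRECONDITION & SPEC =====
def Spec_justify_sum_of_elements (A_matrix : List (List Int)) (B_matrix : List (List Int)) (C_matrix : List (List Int)) (out : Int × List (List Int)) : Prop := out = justify_sum_of_elements_alt A_matrix B_matrix C_matrix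
instance (A_matrix : List (List Int)) (B_matrix : List (List Int)) (C_matrix : List (List Int)) (out : Int × List (List Int)) : Decidable (Spec_justify_sum_of_elements A_matrix B_matrix C_matrix out) := by unfold Spec_justify_sum_of_elements; infer_instance

-- ===== CLAIM (what is proved, stated in full; the proofs are below) =====
def Claim_equal_justify_sum_of_elements : Prop := ∀ (A_matrix : List (List Int)) (B_matrix : List (List Int)) (C_matrix : List (List Int)), Dom_justify_sum_of_elements A_matrix B_matrix C_matrix → Spec_justify_sum_of_elements A_matrix B_matrix C_matrix (justify_sum_of_elements A_matrix B_matrix C_matrix)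

-- ===== LEMMAS AND PROOFS =====

-- the element B's guard selects: row i of m at column j, 0 when the row is too short
def triCell (m : List (List Int)) (i j : Nat) : Int :=
  if j < (m.getD i []).length then (m.getD i []).getD j 0 else 0

theorem row_sum (l : List Int) (init : Int) :
    l.foldl (fun s j => s + j) init = init + l.sum := by
  induction l generalizing init with
  | nil => simp
  | cons h t ih => simp only [List.foldl, List.sum_cons, ih]; ring

theorem outer_sum (l : List (List Int)) (init : Int) :
    l.foldl (fun s i => i.foldl (fun s j => s + j) s) init = init + (l.map List.sum).sum := by
  induction l generalizing init with
  | nil => simp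
  | cons h t ih =>
    rw [List.foldl_cons, ih, row_sum]
    simp only [List.map, List.sum_cons]
    ring

theorem sum_mapIdx (g : Nat → List Int → List Int) (m : List (List Int)) :
    ((m.mapIdx g).map List.sum).sum = ∑ i ∈ Finset.range m.length, (g i (m.getD i [])).sum := by
  induction m generalizing g with
  | nil => simp
  | cons x t ih =>
    rw [List.mapIdx_cons, List.map_cons, List.sum_cons, ih, List.length_cons, Finset.sum_range_succ']
    simp [List.getD, add_comm]

theorem sum_map_range (n : Nat) (f : Nat → Int) : ((List.range n).map f).sum = ∑ i ∈ Finset.range n, f i := by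
  induction n with
  | zero => simp
  | succ n ih => rw [List.range_succ, Finset.sum_range_succ]; simp [ih]

theorem take_sum (l : List Int) (k : Nat) : (l.take k).sum = ∑ i ∈ Finset.range (min k l.length), l.getD i 0 := by
  induction l generalizing k with
  | nil => simp
  | cons x t ih =>
    cases k with
    | zero => simp
    | succ k =>
      simp only [List.take_succ_cons, List.sum_cons, ih, List.length_cons]
      rw [show min (k+1) (t.length+1) = min k t.length + 1 by omega, Finset.sum_range_succ']
      simp [List.getD, add_comm]

theorem drop_take_sum (l : List Int) (a b : Nat) :
    ((l.drop a).take (b - a)).sum = ∑ j ∈ Finset.Ico a b, (if j < l.length then l.getD j 0 else 0) := by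
  have h2 : ∑ j ∈ Finset.Ico a b, (if j < l.length then l.getD j 0 else 0)
      = ∑ j ∈ Finset.Ico a (min b l.length), l.getD j 0 := by
    rw [← Finset.sum_subset (Finset.Ico_subset_Ico le_rfl (min_le_left b l.length))]
    · exact Finset.sum_congr rfl (fun j hj => by
        simp only [Finset.mem_Ico] at hj
        rw [if_pos (by omega)])
    · intro j hj hnj
      simp only [Finset.mem_Ico] at hj hnj
      rw [if_neg (by omega)]
  rw [h2, Finset.sum_Ico_eq_sum_range, take_sum]
  have hm : min (b - a) (l.drop a).length = min b l.length - a := by simp; omega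
  rw [hm]
  exact Finset.sum_congr rfl (fun i _ => by
    simp [List.getD_eq_getElem?_getD, List.getElem?_drop])

-- A's per-matrix sum, row-major: over rows i, columns j ∈ (i, n)
theorem A_side (m : List (List Int)) :
    sum_of_elements (cut_matrix m)
      = ∑ i ∈ Finset.range m.length, ∑ j ∈ Finset.Ico (i+1) m.length, triCell m i j := by
  rw [sum_of_elements, outer_sum, cut_matrix, sum_mapIdx, zero_add]
  refine Finset.sum_congr rfl (fun i _ => ?_)
  have hc : ((i:Int) + 1) = (((i+1 : Nat)) : Int) := by push_cast; ring
  rw [hc, PySem.List.slice_natCast, drop_take_sum]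
  rfl

-- B's per-matrix sum, column-major: over columns j, rows i < j
theorem B_side (m : List (List Int)) :
    tri m = ∑ j ∈ Finset.Ico 1 m.length, ∑ i ∈ Finset.range j, triCell m i j := by
  rw [tri]
  have hinner : ∀ (j : Int) (s : Int),
      (PySem.List.pyRange 0 j 1).foldl (fun s i =>
        let row := PySem.List.pyGetD m i []
        if j < (row.length : Int) then s + PySem.List.pyGetD row j 0 else s) s
      = s + ((PySem.List.pyRange 0 j 1).map (fun i =>
          if j < ((PySem.List.pyGetD m i []).length : Int)
          then PySem.List.pyGetD (PySem.List.pyGetD m i []) j 0 else 0)).sum := by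
    intro j s
    rw [← PySem.List.foldl_add]
    apply PySem.List.foldl_congr_mem
    intro s i _
    simp only []
    split_ifs <;> simp
  have step1 : (PySem.List.pyRange 1 ((m.length:Int)) 1).foldl (fun s j =>
      (PySem.List.pyRange 0 j 1).foldl (fun s i =>
        let row := PySem.List.pyGetD m i []
        if j < (row.length : Int) then s + PySem.List.pyGetD row j 0 else s) s) 0
      = 0 + ((PySem.List.pyRange 1 ((m.length:Int)) 1).map (fun j =>
          ((PySem.List.pyRange 0 j 1).map (fun i =>
            if j < ((PySem.List.pyGetD m i []).length : Int)
            then PySem.List.pyGetD (PySem.List.pyGetD m i []) j 0 else 0)).sum)).sum := by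
    rw [← PySem.List.foldl_add]
    apply PySem.List.foldl_congr_mem
    intro s j _
    exact hinner j s
  rw [step1, zero_add, PySem.List.pyRange_one, List.map_map]
  rw [show (((m.length:Int))-1).toNat = m.length - 1 by omega]
  rw [sum_map_range, Finset.sum_Ico_eq_sum_range]
  refine Finset.sum_congr rfl (fun k hk => ?_)
  simp only [Function.comp]
  have hj : (1:Int)+(k:Int) = ((1+k:Nat):Int) := by push_cast; ring
  rw [hj, PySem.List.pyRange_zero_natCast, List.map_map, sum_map_range]
  refine Finset.sum_congr rfl (fun i hi => ?_)
  simp only [Function.comp, PySem.List.pyGetD_natCast, triCell]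
  split_ifs with h1 h2 h2 <;> try rfl
  · exact absurd (by exact_mod_cast h1) h2
  · exact absurd (by exact_mod_cast h2 : ((1+k:Nat):Int) < ((m.getD i []).length:Int)) h1

-- the two traversal orders of the triangle agree
theorem sums_eq (m : List (List Int)) : sum_of_elements (cut_matrix m) = tri m := by
  rw [A_side, B_side, Finset.range_eq_Ico, Finset.sum_Ico_Ico_comm']
  rcases Nat.eq_zero_or_pos m.length with h | h
  · simp [h]
  · rw [Finset.sum_eq_sum_Ico_succ_bot (by omega : 0 < m.length)]
    simp

theorem getD_ite_some (p : Prop) [Decidable p] (x y d : Int) :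
    (if p then some x else some y).getD d = if p then x else y := by
  split_ifs <;> rfl

theorem main_eq (A B C : List (List Int)) :
    justify_sum_of_elements A B C = justify_sum_of_elements_alt A B C := by
  simp only [justify_sum_of_elements, justify_sum_of_elements_alt, sums_eq,
    PySem.List.enumerate, List.map, List.foldl, PySem.List.pyGetD]
  generalize tri A = a
  generalize tri B = b
  generalize tri C = c
  by_cases hba : b = a <;> by_cases hca : c = a <;> by_cases hcb : c = b <;>
    simp_all [max_elem, List.foldl, PySem.Dict.insert_insert_self,
      PySem.Dict.getD_insert, PySem.Dict.keys_insert_of_not_contains,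
      PySem.Dict.keys_insert_of_contains,
      PySem.Dict.contains_insert, PySem.Dict.contains_empty, PySem.Dict.keys_empty,
      PySem.Dict.getD_empty, getD_ite_some] <;>
    split_ifs <;> simp_all <;> (try split_ifs) <;> (try simp_all [getD_ite_some]) <;> omega

-- ===== VERDICT (by name: the statement is the Claim_ definition above) =====
theorem justify_sum_of_elements_spec : Claim_equal_justify_sum_of_elements := by
  intro a b c _
  unfold Spec_justify_sum_of_elements
  exact main_eq a b c
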